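-- pv_equiv track=rewrite | github.com/Janketop/ipcam-analytics | backend/services/arcface_weights.py | _select_member
-- ===== SOURCE A (Python) =====
-- from typing import Iterable, Optional, Sequence
--
-- _PREFERRED_MODEL_NAMES: tuple[str, ...] = (
--     "w600k_r50.onnx",
--     "glint360k_r100.onnx",
-- )
--
-- def _select_member(names: Sequence[str]) -> Optional[str]:
--     """Выбирает подходящий .onnx файл внутри архива."""
--
--     normalized = [name for name in names if not name.endswith("/")]
--
--     for preferred in _PREFERRED_MODEL_NAMES:
--         for name in normalized:
--             if name.lower().endswith(preferred):
--                 return name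
--
--     for name in normalized:
--         if name.lower().endswith(".onnx"):
--             return name
--
--     return None
-- ===== SOURCE B (Python) =====
-- def _select_member(names):
--     """Single pass: rank each non-directory name (0 = first preferred,
--     1 = second preferred, 2 = any .onnx), keep the earliest lowest-ranked."""
--     best_rank = 3
--     best = None
--     for name in names:
--         if name.endswith("/"):
--             continue
--         low = name.lower()
--         if low.endswith("w600k_r50.onnx"):
--             r = 0
--         elif low.endswith("glint360k_r100.onnx"):
--             r = 1
--         elif low.endswith(".onnx"):
--             r = 2
--         else:
--             continue
--         if r < best_rank:
--             best_rank = r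
--             best = name
--     return best
-- ===== Notes on version B (the rewrite author's own statement) =====
-- stated objective: alternative
-- what changed: Replaces A's three sequential scans over a prebuilt filtered list with a single pass that ranks each name (0/1/2) and keeps the earliest name of strictly lowest rank.
import Mathlib
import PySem

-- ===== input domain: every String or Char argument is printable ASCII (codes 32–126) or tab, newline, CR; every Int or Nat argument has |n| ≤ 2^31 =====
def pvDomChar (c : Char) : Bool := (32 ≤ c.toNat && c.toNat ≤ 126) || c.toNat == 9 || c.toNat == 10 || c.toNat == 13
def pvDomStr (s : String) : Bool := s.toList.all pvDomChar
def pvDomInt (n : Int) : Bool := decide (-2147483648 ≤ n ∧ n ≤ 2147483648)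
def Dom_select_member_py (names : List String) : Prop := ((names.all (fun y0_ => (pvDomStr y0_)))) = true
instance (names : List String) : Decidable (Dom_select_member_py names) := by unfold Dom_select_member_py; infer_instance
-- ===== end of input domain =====

-- ===== PORT A =====
-- B makes a single ranked pass instead of A's prebuilt filtered list plus up to three scans.
-- inner 'for name in normalized: if name.lower().endswith(pref): return name'
def selLoopA (pref : String) : List String → Option String
  | [] => none
  | n :: t => if PySem.Str.endswith (PySem.Str.lower n) pref then some n else selLoopA pref t

def select_member_py (names : List String) : Option String :=
  let normalized := names.filter (fun n => !PySem.Str.endswith n "/")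
  match selLoopA "w600k_r50.onnx" normalized with
  | some n => some n
  | none =>
    match selLoopA "glint360k_r100.onnx" normalized with
    | some n => some n
    | none => selLoopA ".onnx" normalized

-- ===== PORT B =====
def rankOfB (n : String) : Option Nat :=
  let low := PySem.Str.lower n
  if PySem.Str.endswith low "w600k_r50.onnx" then some 0
  else if PySem.Str.endswith low "glint360k_r100.onnx" then some 1
  else if PySem.Str.endswith low ".onnx" then some 2
  else none

def bLoop : List String → Nat → Option String → Option String
  | [], _, best => best
  | n :: t, bestRank, best =>
    if PySem.Str.endswith n "/" then bLoop t bestRank best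
    else
      match rankOfB n with
      | none => bLoop t bestRank best
      | some r => if r < bestRank then bLoop t r (some n) else bLoop t bestRank best

def select_member_py_alt (names : List String) : Option String :=
  bLoop names 3 none

-- ===== PRECONDITION & SPEC =====
def Spec_select_member_py (names : List String) (out : Option String) : Prop := out = select_member_py_alt names
instance (names : List String) (out : Option String) : Decidable (Spec_select_member_py names out) := by unfold Spec_select_member_py; infer_instance

-- ===== CLAIM (what is proved, stated in full; the proofs are below) =====
def Claim_equal_select_member_py : Prop := ∀ (names : List String), Dom_select_member_py names → Spec_select_member_py names (select_member_py names)

-- ===== LEMMAS AND PROOFS =====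
-- B's single pass, started at threshold br with current best b, equals the
-- first-match scans of the filtered list for each rank still strictly below br,
-- in priority order, falling back to b.
theorem bLoop_eq (l : List String) (br : Nat) (b : Option String) :
    bLoop l br b =
      ((if 0 < br then selLoopA "w600k_r50.onnx" (l.filter (fun n => !PySem.Str.endswith n "/")) else none).or
        ((if 1 < br then selLoopA "glint360k_r100.onnx" (l.filter (fun n => !PySem.Str.endswith n "/")) else none).or
         ((if 2 < br then selLoopA ".onnx" (l.filter (fun n => !PySem.Str.endswith n "/")) else none).or b))) := by
  induction l generalizing br b with
  | nil => simp [bLoop, selLoopA]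
  | cons n t ih =>
    by_cases hd : PySem.Str.endswith n "/"
    · simp at hd
      simp [bLoop, hd, ih]
    · simp at hd
      by_cases h0 : PySem.Str.endswith (PySem.Str.lower n) "w600k_r50.onnx"
      · simp at h0
        by_cases hb0 : 0 < br
        · simp [bLoop, rankOfB, selLoopA, hd, h0, hb0, ih]
        · have hbr : br = 0 := by omega
          subst hbr
          simp [bLoop, rankOfB, hd, h0, ih]
      · simp at h0
        by_cases h1 : PySem.Str.endswith (PySem.Str.lower n) "glint360k_r100.onnx"
        · simp at h1
          by_cases hb1 : 1 < br
          · have hb0 : 0 < br := by omega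
            simp [bLoop, rankOfB, selLoopA, hd, h0, h1, hb0, hb1, ih]
          · have hb2 : ¬ 2 < br := by omega
            simp [bLoop, rankOfB, selLoopA, hd, h0, h1, hb1, hb2, ih]
        · simp at h1
          by_cases h2 : PySem.Str.endswith (PySem.Str.lower n) ".onnx"
          · simp at h2
            by_cases hb2 : 2 < br
            · have hb0 : 0 < br := by omega
              have hb1 : 1 < br := by omega
              simp [bLoop, rankOfB, selLoopA, hd, h0, h1, h2, hb0, hb1, hb2, ih]
            · simp [bLoop, rankOfB, selLoopA, hd, h0, h1, h2, hb2, ih]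
          · simp at h2
            simp [bLoop, rankOfB, selLoopA, hd, h0, h1, h2, ih]

-- ===== VERDICT (by name: the statement is the Claim_ definition above) =====
theorem select_member_py_spec : Claim_equal_select_member_py := by
  intro names _
  unfold Spec_select_member_py select_member_py select_member_py_alt
  rw [bLoop_eq]
  simp only [show (0:Nat) < 3 from by norm_num, show (1:Nat) < 3 from by norm_num,
    show (2:Nat) < 3 from by norm_num, if_true]
  cases selLoopA "w600k_r50.onnx" (names.filter (fun n => !PySem.Str.endswith n "/")) with
  | some a => simp [Option.or]
  | none =>
    cases selLoopA "glint360k_r100.onnx" (names.filter (fun n => !PySem.Str.endswith n "/")) with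
    | some a => simp [Option.or]
    | none =>
      cases selLoopA ".onnx" (names.filter (fun n => !PySem.Str.endswith n "/")) with
      | some a => simp [Option.or]
      | none => simp [Option.or]
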